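-- pv_equiv track=rewrite | github.com/paveleroshkinweb/algorithms | python-algorithms/src/problems/not_divisible_subset.py | find_longest_subset_length
-- ===== SOURCE A (Python) =====
-- def find_longest_subset_length(remain_groups, k):
--     common_sum = sum(remain_groups.values())
--     incompatible_groups = get_incompatible_groups(remain_groups, k)
--     for incompatible_group in incompatible_groups:
--         length1 = remain_groups[incompatible_group[0]]
--         length2 = remain_groups[incompatible_group[1]]
--         common_sum -= min(length1, length2)
--     return common_sum
--
-- def get_incompatible_groups(remain_groups, k):
--     incompatible_groups = []
--     for remain in remain_groups:
--         if remain <= k // 2: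
--             incompatible_remain = k - remain
--             if incompatible_remain != remain and remain_groups.get(incompatible_remain) is not None:
--                 incompatible_groups.append((remain, incompatible_remain))
--     return incompatible_groups
-- ===== SOURCE B (Python) =====
-- def find_longest_subset_length(remain_groups, k):
--     half = k // 2
--     total = 0
--     for remain, count in remain_groups.items():
--         complement = k - remain
--         if complement != remain and complement in remain_groups:
--             if remain <= half:
--                 total += max(count, remain_groups[complement])
--             # the partner key accounts for this pair, contribute nothing here
--         else:
--             total += count
--     return total
-- ===== Notes on version B (the rewrite author's own statement) =====
-- stated objective: simpler
-- what changed: A sums all counts, materialises a list of incompatible (lower, upper) remainder pairs, then subtracts each pair's min; B is a single additive pass over the dict items that adds max(count, partner count) at the lower member of a pair, nothing at the upper member, and the count itself at unpaired keys.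
import Mathlib
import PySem

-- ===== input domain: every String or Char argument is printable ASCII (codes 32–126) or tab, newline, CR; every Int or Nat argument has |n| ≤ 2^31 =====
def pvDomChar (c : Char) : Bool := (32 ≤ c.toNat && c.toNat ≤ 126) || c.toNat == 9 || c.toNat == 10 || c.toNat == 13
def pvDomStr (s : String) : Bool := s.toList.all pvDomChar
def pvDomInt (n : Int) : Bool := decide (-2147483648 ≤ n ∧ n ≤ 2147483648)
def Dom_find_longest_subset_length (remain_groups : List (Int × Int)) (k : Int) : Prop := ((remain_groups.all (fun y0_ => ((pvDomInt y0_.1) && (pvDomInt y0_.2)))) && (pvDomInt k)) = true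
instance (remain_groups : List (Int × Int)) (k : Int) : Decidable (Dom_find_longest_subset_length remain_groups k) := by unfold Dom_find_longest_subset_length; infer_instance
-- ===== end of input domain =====

-- B replaces A's two-phase "sum all values, list the incompatible pairs, subtract each pair's min"
-- with a single additive contribution pass over the dict (objective: simpler, one pass, no pair list).

-- ===== PORT A =====
-- helper: get_incompatible_groups(remain_groups, k)
def get_incompatible_groups (d : PySem.Dict Int Int) (k : Int) : List (Int × Int) :=
  d.keys.foldl (fun acc remain =>
    if remain ≤ PySem.Int.floordiv k 2 then
      if k - remain ≠ remain ∧ (d.get? (k - remain)).isSome then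
        acc ++ [(remain, k - remain)]
      else acc
    else acc) []

def find_longest_subset_length (remain_groups : List (Int × Int)) (k : Int) : Int :=
  let d := PySem.Dict.ofList remain_groups
  let common_sum := d.values.sum
  let incompatible_groups := get_incompatible_groups d k
  incompatible_groups.foldl (fun s p => s - min (d.getD p.1 0) (d.getD p.2 0)) common_sum

-- ===== PORT B =====
def find_longest_subset_length_alt (remain_groups : List (Int × Int)) (k : Int) : Int :=
  let d := PySem.Dict.ofList remain_groups
  let half := PySem.Int.floordiv k 2
  d.items.foldl (fun total p =>
    if k - p.1 ≠ p.1 ∧ d.contains (k - p.1) then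
      if p.1 ≤ half then total + max p.2 (d.getD (k - p.1) 0)
      else total
    else total + p.2) 0

-- ===== PRECONDITION & SPEC =====
def Spec_find_longest_subset_length (remain_groups : List (Int × Int)) (k : Int) (out : Int) : Prop := out = find_longest_subset_length_alt remain_groups k
instance (remain_groups : List (Int × Int)) (k : Int) (out : Int) : Decidable (Spec_find_longest_subset_length remain_groups k out) := by unfold Spec_find_longest_subset_length; infer_instance

-- ===== CLAIM (what is proved, stated in full; the proofs are below) =====
def Claim_equal_find_longest_subset_length : Prop := ∀ (remain_groups : List (Int × Int)) (k : Int), Dom_find_longest_subset_length remain_groups k → Spec_find_longest_subset_length remain_groups k (find_longest_subset_length remain_groups k)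

-- ===== LEMMAS AND PROOFS =====

-- a fold that only subtracts is the start value minus the sum of the subtracted amounts
theorem foldl_sub_map (l : List (Int × Int)) (f : Int × Int → Int) (c : Int) :
    l.foldl (fun s p => s - f p) c = c - (l.map f).sum := by
  induction l generalizing c with
  | nil => simp
  | cons p t ih => simp only [List.foldl_cons, List.map_cons, List.sum_cons, ih]; omega

-- B's fold adds an amount per item determined by the item alone
theorem foldl_B (d : PySem.Dict Int Int) (k half : Int) (l : List (Int × Int)) (c : Int) :
    l.foldl (fun total p =>
      if k - p.1 ≠ p.1 ∧ d.contains (k - p.1) then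
        if p.1 ≤ half then total + max p.2 (d.getD (k - p.1) 0)
        else total
      else total + p.2) c
    = c + (l.map (fun p =>
        if k - p.1 ≠ p.1 ∧ d.contains (k - p.1) then
          if p.1 ≤ half then max p.2 (d.getD (k - p.1) 0) else 0
        else p.2)).sum := by
  induction l generalizing c with
  | nil => simp
  | cons p t ih =>
    simp only [List.foldl_cons, List.map_cons, List.sum_cons, ih]
    split_ifs <;> omega

-- A's pair-building fold is a filter-map over the keys
theorem foldl_incompat (d : PySem.Dict Int Int) (k : Int) (l : List Int) (acc : List (Int × Int)) :
    l.foldl (fun acc remain =>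
      if remain ≤ PySem.Int.floordiv k 2 then
        if k - remain ≠ remain ∧ (d.get? (k - remain)).isSome then
          acc ++ [(remain, k - remain)]
        else acc
      else acc) acc
    = acc ++ (l.filter (fun r => decide (r ≤ PySem.Int.floordiv k 2 ∧ k - r ≠ r ∧ (d.get? (k - r)).isSome = true))).map (fun r => (r, k - r)) := by
  induction l generalizing acc with
  | nil => simp
  | cons r t ih =>
    simp only [List.foldl_cons, List.filter_cons]
    by_cases h1 : r ≤ PySem.Int.floordiv k 2
    · by_cases h2 : k - r ≠ r ∧ (d.get? (k - r)).isSome = true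
      · rw [if_pos h1, if_pos h2, ih,
          if_pos (by simp only [decide_eq_true_eq]; exact ⟨h1, h2.1, h2.2⟩)]
        simp only [List.map_cons, List.append_assoc, List.singleton_append]
      · rw [if_pos h1, if_neg h2, ih,
          if_neg (by simp only [decide_eq_true_eq]; intro h; exact h2 ⟨h.2.1, h.2.2⟩)]
    · rw [if_neg h1, ih,
        if_neg (by simp only [decide_eq_true_eq]; intro h; exact h1 h.1)]

-- the lower member of an incompatible pair is ≤ k//2, the upper one is not
theorem partner_not_le (k r : Int) (h1 : r ≤ PySem.Int.floordiv k 2) (h2 : k - r ≠ r) :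
    ¬ (k - r ≤ PySem.Int.floordiv k 2) := by
  have hq := PySem.Int.floordiv_mul_add_mod k 2
  have hm0 := PySem.Int.mod_nonneg k (b := 2) (by omega)
  have hm1 := PySem.Int.mod_lt k (b := 2) (by omega)
  omega

theorem partner_le (k r : Int) (h1 : ¬ r ≤ PySem.Int.floordiv k 2) :
    k - r ≤ PySem.Int.floordiv k 2 := by
  have hq := PySem.Int.floordiv_mul_add_mod k 2
  have hm0 := PySem.Int.mod_nonneg k (b := 2) (by omega)
  have hm1 := PySem.Int.mod_lt k (b := 2) (by omega)
  omega

-- the pairing r ↦ k - r swaps the lower-trigger keys with the upper-partner keys,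
-- so the complements summed at the triggers equal the values left out at the partners
theorem swap_sum (F : Finset Int) (g : Int → Int) (k : Int) :
    (∑ r ∈ F, if r ≤ PySem.Int.floordiv k 2 ∧ k - r ≠ r ∧ k - r ∈ F then g (k - r) else 0)
    = ∑ r ∈ F, if ¬ r ≤ PySem.Int.floordiv k 2 ∧ k - r ≠ r ∧ k - r ∈ F then g r else 0 := by
  rw [← Finset.sum_filter, ← Finset.sum_filter]
  refine Finset.sum_nbij' (fun r => k - r) (fun r => k - r) ?_ ?_ ?_ ?_ ?_
  · intro r hr
    simp only [Finset.mem_filter] at *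
    obtain ⟨hF, h1, h2, h3⟩ := hr
    exact ⟨h3, partner_not_le k r h1 h2, by omega, by simpa using hF⟩
  · intro r hr
    simp only [Finset.mem_filter] at *
    obtain ⟨hF, h1, h2, h3⟩ := hr
    exact ⟨h3, partner_le k r h1, by omega, by simpa using hF⟩
  · intro r _; show k - (k - r) = r; omega
  · intro r _; show k - (k - r) = r; omega
  · intro r _; rfl

-- ===== VERDICT (by name: the statement is the Claim_ definition above) =====
theorem find_longest_subset_length_spec : Claim_equal_find_longest_subset_length := by
  intro remain_groups k _
  unfold Spec_find_longest_subset_length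
  simp only [find_longest_subset_length, find_longest_subset_length_alt, get_incompatible_groups]
  set d := PySem.Dict.ofList remain_groups with hd
  have hnd : d.keys.Nodup := PySem.Dict.nodup_keys_ofList remain_groups
  rw [foldl_incompat, List.nil_append, foldl_sub_map, foldl_B,
    PySem.Dict.values_eq_map_keys d hnd 0, PySem.Dict.items_eq_map_keys d hnd 0,
    List.map_map, List.map_map, zero_add]
  -- replace lookups by membership in the key set
  have hcon : ∀ x : Int, d.contains x = decide (x ∈ d.keys.toFinset) := by
    intro x
    rw [PySem.Dict.contains_eq_decide_mem_keys]
    simp only [List.mem_toFinset]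
  have hget : ∀ x : Int, (d.get? x).isSome = decide (x ∈ d.keys.toFinset) := by
    intro x; rw [← hcon x, PySem.Dict.contains_eq_isSome_get?]
  simp only [hcon, hget]
  -- move to Finset sums over the (nodup) key set
  rw [← List.sum_toFinset _ hnd, ← List.sum_toFinset _ hnd,
    ← List.sum_toFinset _ (hnd.filter _), List.toFinset_filter, Finset.sum_filter]
  set F := d.keys.toFinset with hF
  simp only [decide_eq_true_eq, Function.comp_apply]
  -- the pairing argument
  have hswap :
      (∑ r ∈ F, if r ≤ PySem.Int.floordiv k 2 ∧ k - r ≠ r ∧ k - r ∈ F then d.getD (k - r) 0 else 0)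
      = ∑ r ∈ F, if ¬ r ≤ PySem.Int.floordiv k 2 ∧ k - r ≠ r ∧ k - r ∈ F then d.getD r 0 else 0 :=
    swap_sum F (fun r => d.getD r 0) k
  -- per-key accounting
  have hsplit :
      (∑ x ∈ F, (if k - x ≠ x ∧ k - x ∈ F then
          if x ≤ PySem.Int.floordiv k 2 then max (d.getD x 0) (d.getD (k - x) 0) else 0
        else d.getD x 0))
      = ∑ r ∈ F, (d.getD r 0
          - (if r ≤ PySem.Int.floordiv k 2 ∧ k - r ≠ r ∧ k - r ∈ F then min (d.getD r 0) (d.getD (k - r) 0) else 0)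
          + (if r ≤ PySem.Int.floordiv k 2 ∧ k - r ≠ r ∧ k - r ∈ F then d.getD (k - r) 0 else 0)
          - (if ¬ r ≤ PySem.Int.floordiv k 2 ∧ k - r ≠ r ∧ k - r ∈ F then d.getD r 0 else 0)) := by
    refine Finset.sum_congr rfl fun r _ => ?_
    by_cases hc : k - r ≠ r ∧ k - r ∈ F
    · by_cases hle : r ≤ PySem.Int.floordiv k 2
      · rw [if_pos hc, if_pos hle, if_pos ⟨hle, hc.1, hc.2⟩, if_pos ⟨hle, hc.1, hc.2⟩,
          if_neg (by tauto)]
        omega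
      · rw [if_pos hc, if_neg hle, if_neg (by tauto), if_neg (by tauto),
          if_pos ⟨hle, hc.1, hc.2⟩]
        omega
    · rw [if_neg hc, if_neg (by tauto), if_neg (by tauto), if_neg (by tauto)]
      omega
  rw [hsplit]
  simp only [Finset.sum_sub_distrib, Finset.sum_add_distrib]
  omega
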